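-- pv_equiv track=rewrite | github.com/deliolleh/Solve-Code | BaekjoonRecord/Bronze/B3 - 10250 - ACM 호텔.py | n_room
-- ===== SOURCE A (Python) =====
-- def n_room(height, width, number):
--     n = 1
--     for w in range(1, width + 1):
--         for h in range(1, height + 1):
--             if n == number:
--                 if 0 < w < 10:
--                     return str(h) + '0' + str(w)
--                 else:
--                     return str(h) + str(w)
--             n += 1
-- ===== SOURCE B (Python) =====
-- def n_room(height, width, number):
--     if height <= 0 or not (1 <= number <= height * width):
--         raise ValueError("no such room")
--     floor, col = divmod(number - 1, height)
--     h, w = col + 1, floor + 1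
--     return str(h) + ('0' if w < 10 else '') + str(w)
-- ===== Notes on version B (the rewrite author's own statement) =====
-- stated objective: faster
-- what changed: Replaced the nested counting loops over all rooms by a single divmod(number-1, height) that computes the floor and column directly; B validates its input where A silently falls through to None.
-- outside the precondition, e.g. on n_room(3, 2, 10): A returns None, B raises ValueError
import Mathlib
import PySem

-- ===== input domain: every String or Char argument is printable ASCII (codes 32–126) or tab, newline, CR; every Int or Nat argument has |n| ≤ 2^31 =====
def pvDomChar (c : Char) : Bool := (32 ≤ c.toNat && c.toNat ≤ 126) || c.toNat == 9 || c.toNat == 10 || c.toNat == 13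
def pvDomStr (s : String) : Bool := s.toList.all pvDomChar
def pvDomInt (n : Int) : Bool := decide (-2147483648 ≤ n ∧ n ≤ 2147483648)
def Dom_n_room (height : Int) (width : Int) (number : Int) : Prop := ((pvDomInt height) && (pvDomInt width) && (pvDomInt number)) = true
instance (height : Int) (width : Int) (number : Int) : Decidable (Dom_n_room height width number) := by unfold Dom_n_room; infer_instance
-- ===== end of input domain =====

-- B changes A's nested counting loops (O(number) work) into one divmod; equivalence is
-- claimed on Pre_ (the inputs where A actually returns a string).

-- ===== PORT A =====
-- inner 'for h in range(1, height+1)' loop: fuel counts the remaining iterations,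
-- h is the current loop variable, n the running room counter; 'some' = early return
def n_roomLoopH (number w : Int) (n h : Int) : Nat → Int × Option String
  | 0 => (n, none)
  | Nat.succ fuel =>
    if n = number then
      (n, some (if 0 < w ∧ w < 10
                then PySem.Int.toStr h ++ "0" ++ PySem.Int.toStr w
                else PySem.Int.toStr h ++ PySem.Int.toStr w))
    else n_roomLoopH number w (n + 1) (h + 1) fuel

-- outer 'for w in range(1, width+1)' loop; stops as soon as the inner loop returned
def n_roomLoopW (height number : Int) (n w : Int) : Nat → Int × Option String
  | 0 => (n, none)
  | Nat.succ fuel =>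
    match n_roomLoopH number w n 1 height.toNat with
    | (n', none) => n_roomLoopW height number n' (w + 1) fuel
    | r => r

def n_room (height : Int) (width : Int) (number : Int) : String :=
  ((n_roomLoopW height number 1 1 width.toNat).2).getD ""
  -- Python returns None (no string) when the loops fall through; excluded by Pre_

-- ===== PORT B =====
def n_room_alt (height : Int) (width : Int) (number : Int) : String :=
  if height ≤ 0 ∨ ¬(1 ≤ number ∧ number ≤ height * width) then ""
    -- Python B raises ValueError here (no such room); excluded by Pre_
  else
  let floor := PySem.Int.floordiv (number - 1) height
  let col := PySem.Int.mod (number - 1) height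
  let h := col + 1
  let w := floor + 1
  PySem.Int.toStr h ++ (if w < 10 then "0" else "") ++ PySem.Int.toStr w

-- ===== PRECONDITION & SPEC =====
-- Pre_ admits exactly the inputs where A's loops reach room `number` and return a
-- string; outside it A falls through and returns None, which is not a String.
def Pre_n_room (height : Int) (width : Int) (number : Int) : Prop :=
  0 < height ∧ 1 ≤ number ∧ number ≤ height * width
instance (height : Int) (width : Int) (number : Int) : Decidable (Pre_n_room height width number) := by unfold Pre_n_room; infer_instance

def pvWitness_n_room : Int × Int × Int := (3, 5, 7)

def Spec_n_room (height : Int) (width : Int) (number : Int) (out : String) : Prop := out = n_room_alt height width number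
instance (height : Int) (width : Int) (number : Int) (out : String) : Decidable (Spec_n_room height width number out) := by unfold Spec_n_room; infer_instance

-- ===== CLAIM (what is proved, stated in full; the proofs are below) =====
def Claim_equal_n_room : Prop := ∀ (height : Int) (width : Int) (number : Int), Dom_n_room height width number → Pre_n_room height width number → Spec_n_room height width number (n_room height width number)

-- ===== LEMMAS AND PROOFS =====

-- the label A builds for column w, floor h
def pvLabel (w h : Int) : String :=
  if 0 < w ∧ w < 10 then PySem.Int.toStr h ++ "0" ++ PySem.Int.toStr w
  else PySem.Int.toStr h ++ PySem.Int.toStr w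

theorem loopH_char (number w n h : Int) (fuel : Nat) :
    n_roomLoopH number w n h fuel =
      if n ≤ number ∧ number < n + (fuel : Int)
      then (number, some (pvLabel w (h + (number - n))))
      else (n + (fuel : Int), none) := by
  induction fuel generalizing n h with
  | zero =>
    unfold n_roomLoopH
    rw [if_neg (by push_cast; omega)]
    norm_num
  | succ m ih =>
    unfold n_roomLoopH
    by_cases hn : n = number
    · subst hn
      rw [if_pos rfl,
          if_pos (show n ≤ n ∧ n < n + ((m + 1 : Nat) : Int) by push_cast; omega)]
      unfold pvLabel
      rw [show h + (n - n) = h by ring]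
    · rw [if_neg hn, ih (n + 1) (h + 1)]
      by_cases hc : n ≤ number ∧ number < n + ((m.succ : Nat) : Int)
      · rw [if_pos (by push_cast at hc ⊢; omega), if_pos hc]
        congr 3
        omega
      · rw [if_neg (by push_cast at hc ⊢; omega), if_neg hc]
        congr 1
        push_cast
        ring

theorem loopW_char (height number : Int) (hh : 0 < height) (n w : Int) (fuel : Nat) :
    n_roomLoopW height number n w fuel =
      if 0 ≤ number - n ∧ number - n < (fuel : Int) * height
      then (number, some (pvLabel (w + (number - n) / height) (1 + (number - n) % height)))
      else (n + (fuel : Int) * height, none) := by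
  have hfnn : ∀ f : Nat, (0 : Int) ≤ (f : Int) * height := fun f => by positivity
  induction fuel generalizing n w with
  | zero =>
    unfold n_roomLoopW
    rw [if_neg (by push_cast; omega)]
    norm_num
  | succ m ih =>
    unfold n_roomLoopW
    rw [loopH_char number w n 1 height.toNat]
    have htn : ((height.toNat : Nat) : Int) = height := by omega
    rw [htn]
    have hs : ((m + 1 : Nat) : Int) * height = (m : Int) * height + height := by
      push_cast; ring
    have hm0 := hfnn m
    by_cases hfound : n ≤ number ∧ number < n + height
    · rw [if_pos hfound]
      have hdiv : (number - n) / height = 0 :=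
        Int.ediv_eq_zero_of_lt (by omega) (by omega)
      have hmod : (number - n) % height = number - n :=
        Int.emod_eq_of_lt (by omega) (by omega)
      rw [if_pos ⟨by omega, by omega⟩, hdiv, hmod]
      simp only []
      congr 3
      omega
    · rw [if_neg hfound]
      simp only []
      rw [ih (n + height) (w + 1)]
      by_cases hc : 0 ≤ number - (n + height) ∧ number - (n + height) < (m : Int) * height
      · rw [if_pos hc, if_pos ⟨by omega, by omega⟩]
        have e1 : number - (n + height) = (number - n) - height := by ring
        have hdiv : (number - n - height) / height = (number - n) / height - 1 := by
          have := Int.add_mul_ediv_right (number - n - height) 1 (show height ≠ 0 by omega)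
          simp at this
          omega
        have hmod : (number - n - height) % height = (number - n) % height := by
          conv_rhs => rw [show number - n = (number - n - height) + 1 * height by ring]
          rw [Int.add_mul_emod_self_right]
        rw [e1, hdiv, hmod]
        congr 3
        omega
      · rw [if_neg hc, if_neg (by intro hx; exact hc ⟨by omega, by omega⟩)]
        congr 1
        omega

-- ===== VERDICT (by name: the statement is the Claim_ definition above) =====
theorem n_room_spec : Claim_equal_n_room := by
  intro height width number _ hpre
  obtain ⟨hh, hn1, hn2⟩ := hpre
  have hw : 0 ≤ width := by nlinarith
  unfold Spec_n_room n_room n_room_alt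
  rw [if_neg (by rw [not_or, not_not]; exact ⟨by omega, hn1, hn2⟩)]
  rw [loopW_char height number hh 1 1 width.toNat]
  have htw : ((width.toNat : Nat) : Int) = width := by omega
  rw [htw]
  rw [if_pos ⟨by omega, by nlinarith⟩]
  simp only [Option.getD_some]
  rw [PySem.Int.floordiv_eq_ediv_of_pos hh, PySem.Int.mod_eq_emod_of_pos hh]
  have hdnn : 0 ≤ (number - 1) / height := Int.ediv_nonneg (by omega) (by omega)
  rw [show (1 : Int) + (number - 1) / height = (number - 1) / height + 1 by ring,
      show (1 : Int) + (number - 1) % height = (number - 1) % height + 1 by ring]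
  unfold pvLabel
  by_cases hw10 : (number - 1) / height + 1 < 10
  · rw [if_pos ⟨by omega, hw10⟩, if_pos hw10]
  · rw [if_neg (by omega), if_neg hw10]
    simp only [String.append_empty]
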